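-- pv_equiv track=rewrite | github.com/zuquan-song/leetcode | python/databricks/cell_walk.py | cell_walk
-- ===== SOURCE A (Python) =====
-- def cell_walk(matrix):
--     n = len(matrix)
--     res = []
--     for start in range(n):
--         i, j, value = start, 0, 0
--         while i > 0:
--             value += matrix[i][j]
--             i, j = i - 1, j + 1
--
--         while j < n:
--             value += matrix[i][j]
--             i, j = i + 1, j + 1
--         res.append((value, start))
--     res.sort(key=lambda x: (-x[0], -x[1]))
--     return [r[1] for r in res]
-- ===== SOURCE B (Python) =====
-- def cell_walk(matrix):
--     n = len(matrix)
--     anti = [0] * n   # anti[s] = sum of matrix[i][j] over i + j == s (s < n)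
--     main = [0] * n   # main[d] = sum of matrix[i][j] over j - i == d (j < n)
--     for i in range(n):
--         row = matrix[i]
--         for j in range(n):
--             v = row[j]
--             if i + j < n:
--                 anti[i + j] += v
--             if i <= j:
--                 main[j - i] += v
--     pairs = [(anti[s] - matrix[0][s] + main[s], s) for s in range(n)]
--     pairs.sort(key=lambda x: (-x[0], -x[1]))
--     return [p[1] for p in pairs]
-- ===== Notes on version B (the rewrite author's own statement) =====
-- stated objective: alternative
-- what changed: Instead of retracing the V-shaped walk cell by cell for every start row, B makes one pass over all cells building anti-diagonal and main-diagonal sum tables and reads each start's value as anti[s] - matrix[0][s] + main[s].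
import Mathlib
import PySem

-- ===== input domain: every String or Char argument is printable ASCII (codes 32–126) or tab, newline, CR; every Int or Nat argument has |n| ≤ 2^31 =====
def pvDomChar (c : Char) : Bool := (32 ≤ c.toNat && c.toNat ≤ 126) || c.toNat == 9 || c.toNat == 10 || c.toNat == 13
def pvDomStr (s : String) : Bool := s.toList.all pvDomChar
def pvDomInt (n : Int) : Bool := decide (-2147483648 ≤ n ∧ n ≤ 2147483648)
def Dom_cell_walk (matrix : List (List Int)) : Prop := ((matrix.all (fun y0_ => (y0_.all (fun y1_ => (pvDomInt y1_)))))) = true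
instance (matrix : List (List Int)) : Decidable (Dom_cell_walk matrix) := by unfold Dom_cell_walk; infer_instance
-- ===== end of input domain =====

-- B replaces A's per-start V-shaped walk by a single table-building pass over all cells
-- (anti-diagonal and main-diagonal sum tables), then reads each start's value off the tables
-- (alternative decomposition, same asymptotic cost). Return value only: A sorts a local list.


-- ===== PORT A =====
def cwLoop1 (matrix : List (List Int)) (i j value : Int) : Int × Int × Int :=
  if 0 < i then
    cwLoop1 matrix (i - 1) (j + 1)
      (value + PySem.List.pyGetD (PySem.List.pyGetD matrix i []) j 0)
  else (i, j, value)
termination_by i.toNat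
decreasing_by omega

def cwLoop2 (matrix : List (List Int)) (n i j value : Int) : Int × Int × Int :=
  if j < n then
    cwLoop2 matrix n (i + 1) (j + 1)
      (value + PySem.List.pyGetD (PySem.List.pyGetD matrix i []) j 0)
  else (i, j, value)
termination_by (n - j).toNat
decreasing_by omega

def cell_walk (matrix : List (List Int)) : List Int :=
  let n : Int := matrix.length
  let res : List (Int × Int) :=
    (PySem.List.pyRange 0 n 1).foldl
      (fun res start =>
        let w1 := cwLoop1 matrix start 0 0
        let w2 := cwLoop2 matrix n w1.1 w1.2.1 w1.2.2
        res ++ [(w2.2.2, start)]) []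
  (PySem.List.sorted2 res (fun x => -x.1) (fun x => -x.2) false).map (fun r => r.2)

-- ===== PORT B =====
def cwInner (matrix : List (List Int)) (n i : Int) (st : List Int × List Int) (j : Int) :
    List Int × List Int :=
  let row := PySem.List.pyGetD matrix i []
  let v := PySem.List.pyGetD row j 0
  let st1 :=
    if i + j < n then
      (st.1.set (i + j).toNat (PySem.List.pyGetD st.1 (i + j) 0 + v), st.2)
    else st
  if i ≤ j then
    (st1.1, st1.2.set (j - i).toNat (PySem.List.pyGetD st1.2 (j - i) 0 + v))
  else st1

def cwRow (matrix : List (List Int)) (n : Int) (st : List Int × List Int) (i : Int) :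
    List Int × List Int :=
  (PySem.List.pyRange 0 n 1).foldl (cwInner matrix n i) st

def cell_walk_alt (matrix : List (List Int)) : List Int :=
  let n : Int := matrix.length
  let tabs :=
    (PySem.List.pyRange 0 n 1).foldl (cwRow matrix n)
      (List.replicate n.toNat 0, List.replicate n.toNat 0)
  let pairs : List (Int × Int) :=
    (PySem.List.pyRange 0 n 1).map (fun s =>
      (PySem.List.pyGetD tabs.1 s 0
         - PySem.List.pyGetD (PySem.List.pyGetD matrix 0 []) s 0
         + PySem.List.pyGetD tabs.2 s 0, s))
  (PySem.List.sorted2 pairs (fun x => -x.1) (fun x => -x.2) false).map (fun r => r.2)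

-- ===== PRECONDITION & SPEC =====
-- Pre_ excludes exactly the inputs on which Python A raises IndexError: some row shorter than len(matrix).
def Pre_cell_walk (matrix : List (List Int)) : Prop :=
  ∀ row ∈ matrix, matrix.length ≤ row.length
instance (matrix : List (List Int)) : Decidable (Pre_cell_walk matrix) := by
  unfold Pre_cell_walk; infer_instance
def pvWitness_cell_walk : List (List Int) := [[1, 2], [3, 4]]

def Spec_cell_walk (matrix : List (List Int)) (out : List Int) : Prop := out = cell_walk_alt matrix
instance (matrix : List (List Int)) (out : List Int) : Decidable (Spec_cell_walk matrix out) := by unfold Spec_cell_walk; infer_instance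

-- ===== CLAIM (what is proved, stated in full; the proofs are below) =====
def Claim_equal_cell_walk : Prop := ∀ (matrix : List (List Int)), Dom_cell_walk matrix → Pre_cell_walk matrix → Spec_cell_walk matrix (cell_walk matrix)

-- ===== LEMMAS AND PROOFS =====
def pvIdx (m : List (List Int)) (i j : Int) : Int :=
  PySem.List.pyGetD (PySem.List.pyGetD m i []) j 0

theorem cwInner_eq (m : List (List Int)) (n i : Int) (st : List Int × List Int) (j : Int) :
    cwInner m n i st j =
      ((if i + j < n then
          st.1.set (i + j).toNat (PySem.List.pyGetD st.1 (i + j) 0 + pvIdx m i j)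
        else st.1),
       (if i ≤ j then
          st.2.set (j - i).toNat (PySem.List.pyGetD st.2 (j - i) 0 + pvIdx m i j)
        else st.2)) := by
  simp only [cwInner, pvIdx]
  split_ifs <;> rfl

theorem pv_ofFn_getD_self (l : List Int) :
    List.ofFn (n := l.length) (fun s => l.getD s 0) = l := by
  apply List.ext_getElem (by simp)
  intro idx h1 h2
  simp [List.getD_eq_getElem?_getD]

theorem pv_ofFn_getD (l : List Int) (n : Nat) (h : l.length = n) :
    List.ofFn (n := n) (fun s => l.getD s 0) = l := by
  subst h; exact pv_ofFn_getD_self l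

theorem pv_loop1 (m : List (List Int)) (a : Nat) : ∀ (j v : Int),
    cwLoop1 m (a : Int) j v =
      (0, j + a, v + ((List.range a).map (fun t : Nat => pvIdx m ((a : Int) - (t:Int)) (j + (t:Int)))).sum) := by
  induction a with
  | zero => intro j v; rw [cwLoop1]; simp
  | succ b ih =>
    intro j v
    rw [cwLoop1]
    rw [if_pos (by exact_mod_cast Nat.succ_pos b)]
    have h1 : ((b + 1 : Nat) : Int) - 1 = (b : Int) := by push_cast; ring
    rw [h1, ih]
    refine Prod.ext rfl (Prod.ext (by push_cast; ring) ?_)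
    have hmap : (List.range b).map (fun t : Nat => pvIdx m ((b:Int) - (t:Int)) (j + 1 + (t:Int)))
        = (List.range b).map (fun t : Nat => pvIdx m (((b+1:Nat):Int) - ((Nat.succ t : Nat):Int)) (j + ((Nat.succ t : Nat):Int))) :=
      List.map_congr_left (by intro t ht; congr 1 <;> push_cast <;> ring)
    simp only [List.range_succ_eq_map, List.map_cons, List.map_map, List.sum_cons,
      Function.comp_def]
    rw [hmap]
    simp only [Nat.cast_zero, add_zero, sub_zero, Nat.succ_eq_add_one]
    simp [pvIdx]
    ring

theorem pv_loop2 (m : List (List Int)) (c : Nat) : ∀ (n i v : Int),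
    cwLoop2 m n i (n - (c:Int)) v =
      (i + c, n, v + ((List.range c).map (fun t : Nat => pvIdx m (i + (t:Int)) (n - (c:Int) + (t:Int)))).sum) := by
  induction c with
  | zero => intro n i v; rw [cwLoop2]; simp
  | succ b ih =>
    intro n i v
    rw [cwLoop2]
    rw [if_pos (by push_cast; omega)]
    have h1 : n - ((b + 1 : Nat) : Int) + 1 = n - (b : Int) := by push_cast; ring
    rw [h1, ih]
    refine Prod.ext (by push_cast; ring) (Prod.ext rfl ?_)
    have hmap : (List.range b).map (fun t : Nat => pvIdx m (i + 1 + (t:Int)) (n - (b:Int) + (t:Int)))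
        = (List.range b).map (fun t : Nat => pvIdx m (i + ((Nat.succ t : Nat):Int)) (n - ((b+1:Nat):Int) + ((Nat.succ t : Nat):Int))) :=
      List.map_congr_left (by intro t ht; congr 1 <;> push_cast <;> ring)
    simp only [List.range_succ_eq_map, List.map_cons, List.map_map, List.sum_cons,
      Function.comp_def]
    rw [hmap]
    simp only [Nat.cast_zero, add_zero, Nat.succ_eq_add_one]
    simp [pvIdx]
    ring

theorem pv_inner (m : List (List Int)) (i : Nat) (A M : List Int)
    (hA : A.length = m.length) (hM : M.length = m.length) :
    ∀ (k : Nat), k ≤ m.length →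
    ((List.range k).foldl (fun st j => cwInner m (m.length : Int) (i : Int) st ((j:Nat) : Int)) (A, M)) =
      (List.ofFn (n := m.length) (fun s =>
          A.getD s 0 + if i ≤ (s:Nat) ∧ (s:Nat) < i + k then pvIdx m (i:Int) ((((s:Nat) - i : Nat)):Int) else 0),
       List.ofFn (n := m.length) (fun d =>
          M.getD d 0 + if (d:Nat) + i < k then pvIdx m (i:Int) ((((d:Nat) + i : Nat)):Int) else 0)) := by
  intro k
  induction k with
  | zero =>
    intro _
    simp only [List.range_zero, List.foldl_nil]
    rw [Prod.mk.injEq]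
    constructor
    · rw [show (fun s : Fin m.length => A.getD s 0 + if i ≤ (s:Nat) ∧ (s:Nat) < i + 0 then pvIdx m (i:Int) ((((s:Nat) - i : Nat)):Int) else 0)
          = (fun s : Fin m.length => A.getD s 0) from funext (fun s => by rw [if_neg (by omega), add_zero])]
      exact (pv_ofFn_getD A m.length hA).symm
    · rw [show (fun d : Fin m.length => M.getD d 0 + if (d:Nat) + i < 0 then pvIdx m (i:Int) ((((d:Nat) + i : Nat)):Int) else 0)
          = (fun d : Fin m.length => M.getD d 0) from funext (fun d => by rw [if_neg (by omega), add_zero])]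
      exact (pv_ofFn_getD M m.length hM).symm
  | succ b ih =>
    intro hb
    rw [List.range_succ, List.foldl_append, ih (by omega), List.foldl_cons, List.foldl_nil,
      cwInner_eq]
    have hblt : b < m.length := by omega
    rw [Prod.mk.injEq]
    constructor
    · -- anti component
      by_cases hbn : i + b < m.length
      · rw [if_pos (by exact_mod_cast hbn)]
        rw [show ((i:Int) + (b:Int)) = ((i + b : Nat) : Int) from by push_cast; ring]
        rw [Int.toNat_natCast, PySem.List.pyGetD_natCast]
        apply List.ext_getElem (by simp)
        intro s h1 h2
        rw [List.getElem_set]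
        simp only [List.getElem_ofFn]
        by_cases hs : i + b = s
        · rw [if_pos hs]
          have : (List.ofFn (n := m.length) (fun s =>
              A.getD s 0 + if i ≤ (s:Nat) ∧ (s:Nat) < i + b then pvIdx m (i:Int) ((((s:Nat) - i : Nat)):Int) else 0)).getD (i+b) 0
              = A.getD (i+b) 0 + if i ≤ i+b ∧ i+b < i + b then pvIdx m (i:Int) (((i + b - i : Nat)):Int) else 0 := by
            rw [List.getD_eq_getElem _ _ (by simpa using hbn), List.getElem_ofFn]
          rw [this, if_neg (by omega), add_zero]
          rw [if_pos (by omega)]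
          subst hs
          congr 2
          omega
        · rw [if_neg hs]
          congr 1
          by_cases hc : i ≤ s ∧ s < i + b
          · rw [if_pos hc, if_pos (by omega)]
          · rw [if_neg hc, if_neg (by omega)]
      · rw [if_neg (by omega)]
        exact congrArg List.ofFn (funext fun s => by
          congr 1
          by_cases hc : i ≤ (s:Nat) ∧ (s:Nat) < i + b
          · rw [if_pos hc, if_pos (by omega)]
          · have := s.isLt
            rw [if_neg hc, if_neg (by omega)])
    · -- main component
      by_cases hib : i ≤ b
      · rw [if_pos (by exact_mod_cast hib)]
        rw [show ((b:Int) - (i:Int)) = ((b - i : Nat) : Int) from by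
          rw [Nat.cast_sub hib]]
        rw [Int.toNat_natCast, PySem.List.pyGetD_natCast]
        apply List.ext_getElem (by simp)
        intro d h1 h2
        rw [List.getElem_set]
        simp only [List.getElem_ofFn]
        by_cases hd : b - i = d
        · rw [if_pos hd]
          have : (List.ofFn (n := m.length) (fun d =>
              M.getD d 0 + if (d:Nat) + i < b then pvIdx m (i:Int) ((((d:Nat) + i : Nat)):Int) else 0)).getD (b-i) 0
              = M.getD (b-i) 0 + if (b-i) + i < b then pvIdx m (i:Int) (((b - i + i : Nat)):Int) else 0 := by
            rw [List.getD_eq_getElem _ _ (by simp; omega), List.getElem_ofFn]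
          rw [this, if_neg (by omega), add_zero]
          rw [if_pos (by omega)]
          subst hd
          congr 2
          omega
        · rw [if_neg hd]
          congr 1
          by_cases hc : (d:Nat) + i < b
          · rw [if_pos hc, if_pos (by omega)]
          · rw [if_neg hc, if_neg (by omega)]
      · rw [if_neg (by omega)]
        exact congrArg List.ofFn (funext fun d => by
          congr 1
          by_cases hc : (d:Nat) + i < b
          · rw [if_pos hc, if_pos (by omega)]
          · rw [if_neg hc, if_neg (by omega)])

theorem pv_outer (m : List (List Int)) : ∀ (k : Nat), k ≤ m.length →
    ((List.range k).foldl (fun st i => cwRow m (m.length : Int) st ((i:Nat) : Int))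
        (List.replicate m.length 0, List.replicate m.length 0)) =
      (List.ofFn (n := m.length) (fun s =>
          ∑ i ∈ Finset.range k, if i ≤ (s:Nat) then pvIdx m (i:Int) ((((s:Nat) - i : Nat)):Int) else 0),
       List.ofFn (n := m.length) (fun d =>
          ∑ i ∈ Finset.range k, if (d:Nat) + i < m.length then pvIdx m (i:Int) ((((d:Nat) + i : Nat)):Int) else 0)) := by
  intro k
  induction k with
  | zero =>
    intro _
    simp [List.ofFn_const]
  | succ b ih =>
    intro hb
    rw [List.range_succ, List.foldl_append, ih (by omega), List.foldl_cons, List.foldl_nil]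
    rw [cwRow, PySem.List.pyRange_zero_natCast, List.foldl_map]
    rw [pv_inner m b _ _ (by simp) (by simp) m.length le_rfl]
    rw [Prod.mk.injEq]
    constructor
    · apply congrArg List.ofFn
      funext s
      rw [List.getD_eq_getElem _ _ (by simpa using s.isLt), List.getElem_ofFn,
        Finset.sum_range_succ]
      congr 1
      by_cases hc : b ≤ (s:Nat)
      · rw [if_pos (by exact ⟨hc, by have := s.isLt; omega⟩), if_pos hc]
      · rw [if_neg (by omega), if_neg hc]
    · apply congrArg List.ofFn
      funext d
      rw [List.getD_eq_getElem _ _ (by simpa using d.isLt), List.getElem_ofFn,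
        Finset.sum_range_succ]

theorem pv_sum_list (a : Nat) (f : Nat → Int) :
    ((List.range a).map f).sum = ∑ t ∈ Finset.range a, f t := Int.neg_inj.mp rfl

theorem pv_main (m : List (List Int)) : cell_walk m = cell_walk_alt m := by
  simp only [cell_walk, cell_walk_alt]
  rw [PySem.List.foldl_append_singleton_eq_map, List.nil_append]
  congr 1
  rw [Int.toNat_natCast, PySem.List.pyRange_zero_natCast, List.foldl_map,
    pv_outer m m.length le_rfl, List.map_map, List.map_map]
  congr 1
  apply List.map_congr_left
  intro s hs
  rw [List.mem_range] at hs
  simp only [Function.comp]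
  refine Prod.ext ?_ rfl
  -- A's walk value
  rw [pv_loop1 m s 0 0]
  have hns : ((0:Int) + (s:Nat)) = ((m.length:Nat):Int) - (((m.length - s : Nat)):Int) := by omega
  simp only []
  rw [hns, pv_loop2 m (m.length - s) ((m.length:Nat):Int) 0]
  simp only []
  -- B's table value
  rw [show PySem.List.pyGetD (PySem.List.pyGetD m 0 []) ((s:Nat):Int) 0 = pvIdx m 0 ((s:Nat):Int) from rfl]
  rw [PySem.List.pyGetD_natCast, PySem.List.pyGetD_natCast,
    List.getD_eq_getElem _ _ (by simpa using hs), List.getD_eq_getElem _ _ (by simpa using hs),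
    List.getElem_ofFn, List.getElem_ofFn]
  -- sums
  rw [pv_sum_list, pv_sum_list]
  have hsub1 : Finset.range (s+1) ⊆ Finset.range m.length := by
    intro x hx; rw [Finset.mem_range] at hx ⊢; omega
  have hsub2 : Finset.range (m.length - s) ⊆ Finset.range m.length := by
    intro x hx; rw [Finset.mem_range] at hx ⊢; omega
  have hanti : (∑ i ∈ Finset.range m.length, if i ≤ s then pvIdx m (i:Int) (((s - i : Nat)):Int) else 0)
      = ∑ i ∈ Finset.range (s+1), pvIdx m (i:Int) (((s - i : Nat)):Int) := by
    rw [← Finset.sum_subset (f := fun i => if i ≤ s then pvIdx m (i:Int) (((s - i : Nat)):Int) else 0)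
      hsub1
      (by intro x hx hnx; rw [Finset.mem_range] at hx hnx; simp only []; rw [if_neg (by omega)])]
    exact Finset.sum_congr rfl (by intro x hx; rw [Finset.mem_range] at hx; rw [if_pos (by omega)])
  have hmain : (∑ i ∈ Finset.range m.length, if s + i < m.length then pvIdx m (i:Int) (((s + i : Nat)):Int) else 0)
      = ∑ i ∈ Finset.range (m.length - s), pvIdx m (i:Int) (((s + i : Nat)):Int) := by
    rw [← Finset.sum_subset (f := fun i => if s + i < m.length then pvIdx m (i:Int) (((s + i : Nat)):Int) else 0)
      hsub2
      (by intro x hx hnx; rw [Finset.mem_range] at hx hnx; simp only []; rw [if_neg (by omega)])]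
    exact Finset.sum_congr rfl (by intro x hx; rw [Finset.mem_range] at hx; rw [if_pos (by omega)])
  have hsplit := Finset.sum_range_succ' (fun i => pvIdx m (i:Int) (((s - i : Nat)):Int)) s

  rw [hanti, hmain, hsplit]
  have hz : pvIdx m ((0:Nat):Int) (((s - 0 : Nat)):Int) = pvIdx m 0 ((s:Nat):Int) := by norm_num
  rw [hz]
  have hA : ∑ t ∈ Finset.range s, pvIdx m (((s:Nat):Int) - (t:Int)) (0 + (t:Int))
      = ∑ k ∈ Finset.range s, pvIdx m (((k+1 : Nat)):Int) (((s - (k+1) : Nat)):Int) := by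
    rw [← Finset.sum_range_reflect (fun t => pvIdx m (((s:Nat):Int) - (t:Int)) (0 + (t:Int))) s]
    apply Finset.sum_congr rfl
    intro j hj
    rw [Finset.mem_range] at hj
    have e1 : (((s:Nat):Int) - (((s - 1 - j : Nat)):Int)) = (((j+1 : Nat)):Int) := by omega
    have e2 : ((0:Int) + (((s - 1 - j : Nat)):Int)) = (((s - (j+1) : Nat)):Int) := by omega
    rw [e1, e2]
  have hM : ∑ t ∈ Finset.range (m.length - s), pvIdx m (0 + (t:Int)) (((m.length:Nat):Int) - (((m.length - s : Nat)):Int) + (t:Int))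
      = ∑ i ∈ Finset.range (m.length - s), pvIdx m (i:Int) (((s + i : Nat)):Int) := by
    apply Finset.sum_congr rfl
    intro j hj
    rw [Finset.mem_range] at hj
    have e1 : ((0:Int) + (j:Int)) = ((j:Nat):Int) := by omega
    have e2 : (((m.length:Nat):Int) - (((m.length - s : Nat)):Int) + (j:Int)) = (((s + j : Nat)):Int) := by omega
    rw [e1, e2]
  rw [hA, hM]
  ring

-- ===== VERDICT (by name: the statement is the Claim_ definition above) =====
theorem cell_walk_spec : Claim_equal_cell_walk := by
  intro matrix _ _
  unfold Spec_cell_walk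
  exact pv_main matrix
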